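-- pv_equiv track=rewrite | github.com/SafwanLjd/PyEgyBest | egybest/__init__.py | __roundQuality
-- ===== SOURCE A (Python) =====
-- def __roundQuality(originalQuality):
-- 	qualities = [2160, 1080, 720, 480, 360, 240]
-- 	lastDifference = abs(qualities[0] - originalQuality)
--
-- 	roundedQuality = qualities[0]
-- 	for quality in qualities:
-- 		difference = abs(quality - originalQuality)
-- 		if difference < lastDifference:
-- 			lastDifference = difference
-- 			roundedQuality = quality
--
-- 	return roundedQuality
-- ===== SOURCE B (Python) =====
-- def __roundQuality(originalQuality):
-- 	if originalQuality >= 1620: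
-- 		return 2160
-- 	elif originalQuality >= 900:
-- 		return 1080
-- 	elif originalQuality >= 600:
-- 		return 720
-- 	elif originalQuality >= 420:
-- 		return 480
-- 	elif originalQuality >= 300:
-- 		return 360
-- 	else:
-- 		return 240
-- ===== Notes on version B (the rewrite author's own statement) =====
-- stated objective: simpler
-- what changed: Replaced the abs-difference minimization loop over the six qualities by a closed-form chain of threshold comparisons against the midpoints of adjacent qualities, with >= at each midpoint so ties pick the larger quality like A's strict-improvement rule.
import Mathlib
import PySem

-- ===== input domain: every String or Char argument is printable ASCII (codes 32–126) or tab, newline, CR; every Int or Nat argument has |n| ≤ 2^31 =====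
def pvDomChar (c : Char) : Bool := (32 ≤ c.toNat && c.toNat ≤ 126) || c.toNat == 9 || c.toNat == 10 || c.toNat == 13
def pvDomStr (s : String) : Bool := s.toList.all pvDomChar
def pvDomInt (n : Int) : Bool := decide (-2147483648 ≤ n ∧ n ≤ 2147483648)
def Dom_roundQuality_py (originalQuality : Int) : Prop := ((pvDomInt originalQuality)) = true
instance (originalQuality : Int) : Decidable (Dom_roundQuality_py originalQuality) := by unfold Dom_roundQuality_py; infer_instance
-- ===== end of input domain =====

-- B replaces A's abs-difference minimization loop by a closed-form midpoint-threshold chain (simpler).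


-- ===== PORT A =====
-- first-wins minimum of |quality - originalQuality| over the fixed quality list, as in A's loop
def roundQuality_py (originalQuality : Int) : Int :=
  let qualities : List Int := [2160, 1080, 720, 480, 360, 240]
  let init : Int × Int := (|2160 - originalQuality|, 2160)
  (qualities.foldl (fun (st : Int × Int) quality =>
    let difference := |quality - originalQuality|
    if difference < st.1 then (difference, quality) else st) init).2

-- ===== PORT B =====
-- B: closed-form threshold chain against midpoints; >= matches A's first-wins tie-break
def roundQuality_py_alt (originalQuality : Int) : Int :=
  if originalQuality ≥ 1620 then 2160
  else if originalQuality ≥ 900 then 1080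
  else if originalQuality ≥ 600 then 720
  else if originalQuality ≥ 420 then 480
  else if originalQuality ≥ 300 then 360
  else 240

-- ===== PRECONDITION & SPEC =====
def Spec_roundQuality_py (originalQuality : Int) (out : Int) : Prop := out = roundQuality_py_alt originalQuality
instance (originalQuality : Int) (out : Int) : Decidable (Spec_roundQuality_py originalQuality out) := by unfold Spec_roundQuality_py; infer_instance

-- ===== CLAIM (what is proved, stated in full; the proofs are below) =====
def Claim_equal_roundQuality_py : Prop := ∀ (originalQuality : Int), Dom_roundQuality_py originalQuality → Spec_roundQuality_py originalQuality (roundQuality_py originalQuality)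

-- ===== LEMMAS AND PROOFS =====

-- ===== VERDICT (by name: the statement is the Claim_ definition above) =====
set_option maxHeartbeats 2000000 in
theorem roundQuality_py_spec : Claim_equal_roundQuality_py := by
  intro q _
  unfold Spec_roundQuality_py roundQuality_py roundQuality_py_alt
  simp only [List.foldl, Int.abs_eq_natAbs]
  split_ifs <;> omega
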